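-- pv_equiv track=rewrite | github.com/Kunal2341/stocks | stocks.py | getStockArray
-- ===== SOURCE A (Python) =====
-- def getStockArray(stocksSelected1, stocksSelected2,dic):
--     selectedALL = stocksSelected1
--
--     for i in stocksSelected2:
--         for j in dic:
--             if dic[j] == i:
--                 selectedALL.append(j)
--     selectedALL = list(set(selectedALL))
--     return selectedALL
-- ===== SOURCE B (Python) =====
-- def getStockArray(stocksSelected1, stocksSelected2, dic):
--     # Reverse index value -> list of keys (dict order), then O(1) lookups.
--     rev = {}
--     for k, v in dic.items():
--         rev.setdefault(v, []).append(k)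
--     selectedALL = list(stocksSelected1)
--     for i in stocksSelected2:
--         selectedALL.extend(rev.get(i, []))
--     return list(set(selectedALL))
-- ===== Notes on version B (the rewrite author's own statement) =====
-- stated objective: faster
-- what changed: B builds a reverse index value->keys over the dict once and then does one O(1) lookup per selected item, instead of A's full scan of the dict for every item; B also does not mutate stocksSelected1 (A appends to it in place).
import Mathlib
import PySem

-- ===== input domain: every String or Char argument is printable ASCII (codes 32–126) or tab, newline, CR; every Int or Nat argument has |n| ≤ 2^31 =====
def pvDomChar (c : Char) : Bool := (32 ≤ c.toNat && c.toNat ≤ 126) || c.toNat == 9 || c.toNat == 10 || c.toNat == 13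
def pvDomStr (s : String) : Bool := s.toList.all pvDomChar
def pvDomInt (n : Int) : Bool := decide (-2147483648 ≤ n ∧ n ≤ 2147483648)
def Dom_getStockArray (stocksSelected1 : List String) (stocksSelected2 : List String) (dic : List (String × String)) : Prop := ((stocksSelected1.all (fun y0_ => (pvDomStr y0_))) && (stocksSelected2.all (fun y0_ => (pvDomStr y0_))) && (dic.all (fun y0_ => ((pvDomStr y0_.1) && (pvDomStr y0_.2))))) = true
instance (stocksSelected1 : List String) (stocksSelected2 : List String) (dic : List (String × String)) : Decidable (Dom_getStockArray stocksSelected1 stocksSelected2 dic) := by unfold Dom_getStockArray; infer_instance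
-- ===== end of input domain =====

-- B replaces A's per-item scan of the whole dict by a reverse index value→keys built once (objective: faster,
-- asymptotic). Return-value equivalence only: Python A appends to stocksSelected1 in place, B does not mutate it.

-- ===== PORT A =====
def getStockArray (stocksSelected1 : List String) (stocksSelected2 : List String) (dic : List (String × String)) : List String :=
  let d := PySem.Dict.ofList dic
  let selectedALL :=
    stocksSelected2.foldl (fun acc i =>
      d.keys.foldl (fun acc2 j =>
        -- dic[j]: j is always a key of dic here, so getD never takes its default
        if d.getD j "" == i then acc2 ++ [j] else acc2) acc) stocksSelected1
  PySem.Set.ofList selectedALL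

-- ===== PORT B =====
def getStockArray_alt (stocksSelected1 : List String) (stocksSelected2 : List String) (dic : List (String × String)) : List String :=
  let d := PySem.Dict.ofList dic
  let rev : PySem.Dict String (List String) :=
    d.items.foldl (fun r kv => r.modify kv.2 [] (· ++ [kv.1])) PySem.Dict.empty
  let selectedALL :=
    stocksSelected2.foldl (fun acc i => acc ++ rev.getD i []) stocksSelected1
  PySem.Set.ofList selectedALL

-- ===== PRECONDITION & SPEC =====
def Spec_getStockArray (stocksSelected1 : List String) (stocksSelected2 : List String) (dic : List (String × String)) (out : List String) : Prop := out = getStockArray_alt stocksSelected1 stocksSelected2 dic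
instance (stocksSelected1 : List String) (stocksSelected2 : List String) (dic : List (String × String)) (out : List String) : Decidable (Spec_getStockArray stocksSelected1 stocksSelected2 dic out) := by unfold Spec_getStockArray; infer_instance

-- ===== CLAIM (what is proved, stated in full; the proofs are below) =====
def Claim_equal_getStockArray : Prop := ∀ (stocksSelected1 : List String) (stocksSelected2 : List String) (dic : List (String × String)), Dom_getStockArray stocksSelected1 stocksSelected2 dic → Spec_getStockArray stocksSelected1 stocksSelected2 dic (getStockArray stocksSelected1 stocksSelected2 dic)

-- ===== LEMMAS AND PROOFS =====

-- the reverse-index lookup rev.getD i [] collects, in order, the first components of the pairs whose value is i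
theorem rev_getD (l : List (String × String)) (acc : PySem.Dict String (List String)) (i : String) :
    (l.foldl (fun r kv => r.modify kv.2 [] (· ++ [kv.1])) acc).getD i []
      = acc.getD i [] ++ (l.filter (fun kv => kv.2 == i)).map (·.1) := by
  induction l generalizing acc with
  | nil => simp
  | cons kv rest ih =>
    by_cases h : kv.2 = i
    · subst h
      simp [List.foldl_cons, ih, PySem.Dict.getD_modify_self]
    · simp [List.foldl_cons, ih, PySem.Dict.getD_modify_of_ne _ _ _ (Ne.symm h), h]

-- A's inner scan over the dict's keys equals B's reverse-index lookup
theorem inner_scan_eq (dic : List (String × String)) (i : String) :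
    ((PySem.Dict.ofList dic).keys.filter (fun j => (PySem.Dict.ofList dic).getD j "" == i))
      = (((PySem.Dict.ofList dic).items.filter (fun kv => kv.2 == i)).map (·.1)) := by
  have hnd := PySem.Dict.nodup_keys_ofList (κ := String) (ν := String) dic
  have hkeys : (PySem.Dict.ofList dic).keys = (PySem.Dict.ofList dic).items.map (·.1) := rfl
  rw [hkeys, List.filter_map]
  congr 1
  apply List.filter_congr
  intro kv hmem
  have := PySem.Dict.getD_of_mem_items (PySem.Dict.ofList dic)
    (k := kv.1) (v := kv.2) (by simpa using hmem) hnd ""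
  simp [Function.comp, this]

-- A's inner scan, as one equation: scanning all keys for value i appends exactly rev.getD i []
theorem scanA_eq (dic : List (String × String)) (i : String) (acc : List String) :
    (PySem.Dict.ofList dic).keys.foldl (fun acc2 j =>
        if (PySem.Dict.ofList dic).getD j "" == i then acc2 ++ [j] else acc2) acc
      = acc ++ ((PySem.Dict.ofList dic).items.foldl
          (fun r kv => r.modify kv.2 [] (· ++ [kv.1])) PySem.Dict.empty).getD i [] := by
  have h := PySem.List.foldl_append_if
    (fun j => (PySem.Dict.ofList dic).getD j "" == i) id (PySem.Dict.ofList dic).keys acc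
  simp only [id_eq, List.map_id] at h
  rw [h, rev_getD _ PySem.Dict.empty i, inner_scan_eq]
  simp [PySem.Dict.getD_empty]

-- the whole selection loop: A's nested scans and B's indexed lookups build the same list
theorem loop_eq (dic : List (String × String)) (rest : List String) : ∀ acc : List String,
    rest.foldl (fun acc i => (PySem.Dict.ofList dic).keys.foldl (fun acc2 j =>
        if (PySem.Dict.ofList dic).getD j "" == i then acc2 ++ [j] else acc2) acc) acc
      = rest.foldl (fun acc i => acc ++ ((PySem.Dict.ofList dic).items.foldl
          (fun r kv => r.modify kv.2 [] (· ++ [kv.1])) PySem.Dict.empty).getD i []) acc := by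
  induction rest with
  | nil => intro acc; rfl
  | cons i rest ih =>
    intro acc
    simp only [List.foldl_cons]
    rw [scanA_eq]
    exact ih _

theorem getStockArray_spec : Claim_equal_getStockArray := by
  intro s1 s2 dic _
  unfold Spec_getStockArray getStockArray getStockArray_alt
  exact congrArg PySem.Set.ofList (loop_eq dic s2 s1)
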